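-- pv_equiv track=rewrite | github.com/sidou06/hackerrank-solutions | Algorithms/Search/Beautiful Quadruples/Solution.py | beautifulQuadruples
-- ===== SOURCE A (Python) =====
-- def beautifulQuadruples(a, b, c, d):
--     #
--     # Write your code here.
--     #
--     # Sort the inputs to ensure that a <= b <= c <= d
--     a, b, c, d = sorted([a, b, c, d])
--
--     # Initialize memory array to store XOR values and a counter for the total iterations
--     mem = [0] * 6000
--     count = 0
--     total = 0
--
--     # Iterate over values from 1 to c and d to calculate the XOR values and store their occurrences
--     for i in range(1, c + 1):
--         for j in range(i, d + 1):
--             mem[i ^ j] += 1  # Update the memory array to track the XOR result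
--             total += 1  # Count the total number of pairs (i, j)
--
--     # Iterate over values from 1 to b to compute the final count by subtracting valid pairs from total
--     for i in range(1, b + 1):
--         for j in range(1, min(a, i) + 1):
--             count += total - mem[i ^ j]  # Subtract occurrences of XOR value from the total count
--
--         for k in range(i, d + 1):
--             mem[i ^ k] -= 1  # Update memory as we move through the pairs
--             total -= 1  # Decrease the total count after modifying the memory
--
--     return count  # Return the final count of beautiful quadruples
-- ===== SOURCE B (Python) =====
-- def beautifulQuadruples(a, b, c, d):
--     # Fix the smaller middle value x; count all quadruples w <= x <= y <= z by a
--     # closed form, then subtract the zero-XOR ones counted with an incremental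
--     # frequency table keyed by w ^ x, swept over y.
--     a, b, c, d = sorted([a, b, c, d])
--     total = 0
--     for x in range(1, b + 1):
--         nw = min(a, x)
--         if nw > 0:
--             k = c - x + 1
--             total += nw * (k * (2 * (d - c) + k + 1) // 2)
--     bad = 0
--     freq = {}
--     for y in range(1, c + 1):
--         if y <= b:
--             for w in range(1, min(a, y) + 1):
--                 v = w ^ y
--                 freq[v] = freq.get(v, 0) + 1
--         for z in range(y, d + 1):
--             bad += freq.get(y ^ z, 0)
--     return total - bad
-- ===== Notes on version B (the rewrite author's own statement) =====
-- stated objective: alternative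
-- what changed: B replaces A's pre-filled 6000-slot XOR table (built over all (y,z) pairs, then decremented per row while subtracting per-pair) by a closed-form Gauss count of all ordered quadruples per smaller-middle value plus an incrementally grown XOR-frequency dictionary swept over the larger-middle value; only the zero-XOR cases are counted pairwise and subtracted once.
-- outside the precondition, e.g. on beautifulQuadruples(0, 0, 1, 4096): A returns 0, B returns 0; on beautifulQuadruples(1, 1, 1, 6000): A raises IndexError, B returns 5999
import Mathlib
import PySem

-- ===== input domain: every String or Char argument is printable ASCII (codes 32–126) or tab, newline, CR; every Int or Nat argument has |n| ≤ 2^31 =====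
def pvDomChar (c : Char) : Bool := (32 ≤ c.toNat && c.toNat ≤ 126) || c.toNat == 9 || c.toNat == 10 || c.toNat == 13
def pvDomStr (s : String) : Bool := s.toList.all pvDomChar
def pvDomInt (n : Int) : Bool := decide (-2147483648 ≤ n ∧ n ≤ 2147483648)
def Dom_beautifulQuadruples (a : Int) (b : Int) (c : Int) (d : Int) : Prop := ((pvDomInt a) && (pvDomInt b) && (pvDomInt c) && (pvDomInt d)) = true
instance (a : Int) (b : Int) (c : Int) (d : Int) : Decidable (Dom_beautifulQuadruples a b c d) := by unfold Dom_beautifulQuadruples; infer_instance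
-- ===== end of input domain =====

-- B re-derives the same count by fixing the smaller middle value and combining a closed-form
-- pair count with an incrementally built XOR-frequency dict, instead of A's pre-filled 6000-slot
-- decremented table; objective: alternative (same asymptotic cost, structurally different).


-- ===== PORT A =====
def beautifulQuadruples (a : Int) (b : Int) (c : Int) (d : Int) : Int :=
  match PySem.List.sorted [a, b, c, d] (fun x => x) false with
  | [a', b', c', d'] =>
    let mem : List Int := List.replicate 6000 (0 : Int)
    let s1 : List Int × Int := (PySem.List.pyRange 1 (c' + 1) 1).foldl
      (fun st i => (PySem.List.pyRange i (d' + 1) 1).foldl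
        (fun st j =>
          (PySem.List.pySetD st.1 (PySem.Int.bxor i j) (PySem.List.pyGetD st.1 (PySem.Int.bxor i j) 0 + 1),
           st.2 + 1)) st)
      (mem, 0)
    let s2 : (List Int × Int) × Int := (PySem.List.pyRange 1 (b' + 1) 1).foldl
      (fun st i =>
        let cnt := (PySem.List.pyRange 1 (min a' i + 1) 1).foldl
          (fun cnt j => cnt + (st.1.2 - PySem.List.pyGetD st.1.1 (PySem.Int.bxor i j) 0)) st.2
        let mt := (PySem.List.pyRange i (d' + 1) 1).foldl
          (fun p k => (PySem.List.pySetD p.1 (PySem.Int.bxor i k) (PySem.List.pyGetD p.1 (PySem.Int.bxor i k) 0 - 1), p.2 - 1)) st.1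
        (mt, cnt))
      (s1, 0)
    s2.2
  | _ => 0

-- ===== PORT B =====
def beautifulQuadruples_alt (a : Int) (b : Int) (c : Int) (d : Int) : Int :=
  -- tuple unpacking 'a, b, c, d = sorted([a, b, c, d])' ported as the four element reads
  let s := PySem.List.sorted [a, b, c, d] (fun x => x) false
  let a' := PySem.List.pyGetD s 0 0
  let b' := PySem.List.pyGetD s 1 0
  let c' := PySem.List.pyGetD s 2 0
  let d' := PySem.List.pyGetD s 3 0

    let total : Int := (PySem.List.pyRange 1 (b' + 1) 1).foldl
      (fun tot x =>
        let nw := min a' x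
        if nw > 0 then
          let k := c' - x + 1
          tot + nw * PySem.Int.floordiv (k * (2 * (d' - c') + k + 1)) 2
        else tot) 0
    let s : PySem.Dict Int Int × Int := (PySem.List.pyRange 1 (c' + 1) 1).foldl
      (fun st y =>
        let fr := if y ≤ b' then
            (PySem.List.pyRange 1 (min a' y + 1) 1).foldl
              (fun fr w =>
                let v := PySem.Int.bxor w y
                fr.insert v (fr.getD v 0 + 1)) st.1
          else st.1
        let bd := (PySem.List.pyRange y (d' + 1) 1).foldl
          (fun bd z => bd + fr.getD (PySem.Int.bxor y z) 0) st.2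
        (fr, bd))
      (PySem.Dict.empty, 0)
    total - s.2

-- ===== PRECONDITION & SPEC =====
-- Pre_ excludes inputs on which at least two arguments are positive and some argument exceeds
-- 4095: there A's fixed 6000-entry table can be indexed out of range, raising IndexError.  On
-- the few such inputs whose XOR values happen to stay below 6000 A still returns (Pre_ is
-- conservatively narrower than the exact crash region); see the cite in claim.json.
def Pre_beautifulQuadruples (a : Int) (b : Int) (c : Int) (d : Int) : Prop :=
  ((if 0 < a then (1 : Int) else 0) + (if 0 < b then (1 : Int) else 0)
    + (if 0 < c then (1 : Int) else 0) + (if 0 < d then (1 : Int) else 0) ≤ 1)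
  ∨ (a ≤ 4095 ∧ b ≤ 4095 ∧ c ≤ 4095 ∧ d ≤ 4095)
instance (a : Int) (b : Int) (c : Int) (d : Int) : Decidable (Pre_beautifulQuadruples a b c d) := by unfold Pre_beautifulQuadruples; infer_instance

def pvWitness_beautifulQuadruples : Int × Int × Int × Int := (1, 2, 3, 4)

def Spec_beautifulQuadruples (a : Int) (b : Int) (c : Int) (d : Int) (out : Int) : Prop := out = beautifulQuadruples_alt a b c d
instance (a : Int) (b : Int) (c : Int) (d : Int) (out : Int) : Decidable (Spec_beautifulQuadruples a b c d out) := by unfold Spec_beautifulQuadruples; infer_instance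

-- ===== CLAIM (what is proved, stated in full; the proofs are below) =====
def Claim_equal_beautifulQuadruples : Prop := ∀ (a : Int) (b : Int) (c : Int) (d : Int), Dom_beautifulQuadruples a b c d → Pre_beautifulQuadruples a b c d → Spec_beautifulQuadruples a b c d (beautifulQuadruples a b c d)

-- ===== LEMMAS AND PROOFS =====

-- finite Int-valued sum over a Python range [a, b)
def pvS (a b : Int) (f : Int → Int) : Int := ((PySem.List.pyRange a b).map f).sum

theorem pvS_nil {a b : Int} (h : b ≤ a) (f : Int → Int) : pvS a b f = 0 := by
  simp [pvS, PySem.List.pyRange_one_eq_nil h]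

theorem pvS_cons {a b : Int} (h : a < b) (f : Int → Int) :
    pvS a b f = f a + pvS (a + 1) b f := by
  simp [pvS, PySem.List.pyRange_one_cons h]

theorem pvS_congr {a b : Int} {f g : Int → Int}
    (h : ∀ x, a ≤ x → x < b → f x = g x) : pvS a b f = pvS a b g := by
  unfold pvS
  rw [List.map_congr_left]
  intro x hx
  rw [PySem.List.mem_pyRange_one] at hx
  exact h x hx.1 hx.2

theorem pvS_zero (a b : Int) : pvS a b (fun _ => 0) = 0 := by
  simp [pvS]

theorem pvS_add (a b : Int) (f g : Int → Int) :
    pvS a b (fun x => f x + g x) = pvS a b f + pvS a b g := by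
  simp [pvS]

theorem pvS_sub (a b : Int) (f g : Int → Int) :
    pvS a b (fun x => f x - g x) = pvS a b f - pvS a b g := by
  unfold pvS
  induction (PySem.List.pyRange a b) with
  | nil => simp
  | cons h t ih => simp only [List.map_cons, List.sum_cons, ih]; ring

theorem pvS_append {a m b : Int} (h1 : a ≤ m) (h2 : m ≤ b) (f : Int → Int) :
    pvS a b f = pvS a m f + pvS m b f := by
  simp [pvS, PySem.List.pyRange_one_append a m b h1 h2]

theorem pvS_const (a b t : Int) : pvS a b (fun _ => t) = ((b - a).toNat : Int) * t := by
  simp [pvS, PySem.List.length_pyRange_one]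

theorem pvS_comm (a b c d : Int) (g : Int → Int → Int) :
    pvS a b (fun x => pvS c d (fun y => g x y)) = pvS c d (fun y => pvS a b (fun x => g x y)) := by
  suffices h : ∀ (n : Nat) (a : Int), (b - a).toNat = n →
      pvS a b (fun x => pvS c d (fun y => g x y)) = pvS c d (fun y => pvS a b (fun x => g x y)) from
    h _ a rfl
  intro n
  induction n with
  | zero =>
    intro a ha
    rw [pvS_nil (by omega)]
    calc (0:Int) = pvS c d (fun _ => 0) := (pvS_zero c d).symm
      _ = pvS c d (fun y => pvS a b (fun x => g x y)) :=
        pvS_congr (fun y _ _ => (pvS_nil (by omega) _).symm)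
  | succ n ih =>
    intro a ha
    have hab : a < b := by omega
    rw [pvS_cons hab, ih (a+1) (by omega)]
    calc pvS c d (fun y => g a y) + pvS c d (fun y => pvS (a+1) b (fun x => g x y))
        = pvS c d (fun y => g a y + pvS (a+1) b (fun x => g x y)) := (pvS_add c d _ _).symm
      _ = pvS c d (fun y => pvS a b (fun x => g x y)) :=
        pvS_congr (fun y _ _ => (pvS_cons hab (fun x => g x y)).symm)

-- ---- key lists ----
-- block of XOR keys contributed by a fixed y: y^z for z in [y, d]
def pvBlock (y d : Int) : List Int :=
  (PySem.List.pyRange y (d + 1)).map (fun z => PySem.Int.bxor y z)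

-- all XOR keys y^z for x ≤ y ≤ c, y ≤ z ≤ d (contents of A's mem table)
def pvK (x c d : Int) : List Int :=
  (PySem.List.pyRange x (c + 1)).flatMap (fun y => pvBlock y d)

-- all XOR keys w^x for 1 ≤ x ≤ min(b, m), 1 ≤ w ≤ min(a, x) (contents of B's freq dict)
def pvH (a b m : Int) : List Int :=
  (PySem.List.pyRange 1 (min b m + 1)).flatMap
    (fun x => (PySem.List.pyRange 1 (min a x + 1)).map (fun w => PySem.Int.bxor w x))

theorem pvBlock_bound {y d : Int} (hy : 1 ≤ y) (hy' : y ≤ 4095) (hd : d ≤ 4095) :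
    ∀ k ∈ pvBlock y d, 0 ≤ k ∧ k < 6000 := by
  intro k hk
  simp only [pvBlock, List.mem_map] at hk
  obtain ⟨z, hz, rfl⟩ := hk
  rw [PySem.List.mem_pyRange_one] at hz
  rw [PySem.Int.bxor_of_nonneg (by omega) (by omega)]
  have h1 : y.toNat < 2 ^ 12 := by omega
  have h2 : z.toNat < 2 ^ 12 := by omega
  have := Nat.xor_lt_two_pow h1 h2
  omega

theorem pvK_bound {x c d : Int} (hx : 1 ≤ x) (hc : c ≤ 4095) (hd : d ≤ 4095) :
    ∀ k ∈ pvK x c d, 0 ≤ k ∧ k < 6000 := by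
  intro k hk
  simp only [pvK, List.mem_flatMap] at hk
  obtain ⟨y, hy, hk⟩ := hk
  rw [PySem.List.mem_pyRange_one] at hy
  exact pvBlock_bound (by omega) (by omega) hd k hk

theorem pvK_cons {x c d : Int} (h : x ≤ c) :
    pvK x c d = pvBlock x d ++ pvK (x + 1) c d := by
  simp [pvK, PySem.List.pyRange_one_cons (show x < c + 1 by omega)]

-- ---- histogram loops over an Int-list-backed table ----
theorem pvIncr (ks : List Int) : ∀ (mem : List Int) (t : Int),
    (∀ k ∈ ks, 0 ≤ k ∧ k < (mem.length : Int)) →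
    (ks.foldl (fun (st : List Int × Int) k =>
        (PySem.List.pySetD st.1 k (PySem.List.pyGetD st.1 k 0 + 1), st.2 + 1)) (mem, t)).1.length
        = mem.length ∧
    (ks.foldl (fun (st : List Int × Int) k =>
        (PySem.List.pySetD st.1 k (PySem.List.pyGetD st.1 k 0 + 1), st.2 + 1)) (mem, t)).2
        = t + ks.length ∧
    ∀ v : Int, 0 ≤ v →
      PySem.List.pyGetD (ks.foldl (fun (st : List Int × Int) k =>
        (PySem.List.pySetD st.1 k (PySem.List.pyGetD st.1 k 0 + 1), st.2 + 1)) (mem, t)).1 v 0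
      = PySem.List.pyGetD mem v 0 + (ks.count v : Int) := by
  induction ks with
  | nil => intro mem t _; refine ⟨rfl, by simp, ?_⟩; intro v _; simp
  | cons k ks ih =>
    intro mem t hb
    have hk := hb k (by simp)
    set mem1 := PySem.List.pySetD mem k (PySem.List.pyGetD mem k 0 + 1) with hmem1
    have hlen1 : mem1.length = mem.length := PySem.List.length_pySetD mem k _
    have hb' : ∀ k' ∈ ks, 0 ≤ k' ∧ k' < (mem1.length : Int) := by
      intro k' hk'; rw [hlen1]; exact hb k' (by simp [hk'])
    obtain ⟨ihl, iht, ihv⟩ := ih mem1 (t + 1) hb'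
    simp only [List.foldl_cons]
    refine ⟨by rw [ihl, hlen1], by rw [iht]; simp; omega, ?_⟩
    intro v hv
    rw [ihv v hv]
    have hget : PySem.List.pyGetD mem1 v 0
        = if v = k then PySem.List.pyGetD mem k 0 + 1 else PySem.List.pyGetD mem v 0 := by
      have hkn : k = ((k.toNat : Nat) : Int) := by omega
      have hvn : v = ((v.toNat : Nat) : Int) := by omega
      rw [hmem1, hkn, hvn, PySem.List.pyGetD_pySetD_natCast mem k.toNat v.toNat _ 0 (by omega)]
      by_cases h : v.toNat = k.toNat <;> simp [h] <;> omega
    rw [hget, List.count_cons]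
    by_cases h : v = k
    · simp [h]; ring
    · have : ¬ (k == v) = true := by simp [beq_iff_eq]; omega
      simp [h, this]

theorem pvDecr (ks : List Int) : ∀ (mem : List Int) (t : Int),
    (∀ k ∈ ks, 0 ≤ k ∧ k < (mem.length : Int)) →
    (ks.foldl (fun (st : List Int × Int) k =>
        (PySem.List.pySetD st.1 k (PySem.List.pyGetD st.1 k 0 - 1), st.2 - 1)) (mem, t)).1.length
        = mem.length ∧
    (ks.foldl (fun (st : List Int × Int) k =>
        (PySem.List.pySetD st.1 k (PySem.List.pyGetD st.1 k 0 - 1), st.2 - 1)) (mem, t)).2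
        = t - ks.length ∧
    ∀ v : Int, 0 ≤ v →
      PySem.List.pyGetD (ks.foldl (fun (st : List Int × Int) k =>
        (PySem.List.pySetD st.1 k (PySem.List.pyGetD st.1 k 0 - 1), st.2 - 1)) (mem, t)).1 v 0
      = PySem.List.pyGetD mem v 0 - (ks.count v : Int) := by
  induction ks with
  | nil => intro mem t _; refine ⟨rfl, by simp, ?_⟩; intro v _; simp
  | cons k ks ih =>
    intro mem t hb
    have hk := hb k (by simp)
    set mem1 := PySem.List.pySetD mem k (PySem.List.pyGetD mem k 0 - 1) with hmem1
    have hlen1 : mem1.length = mem.length := PySem.List.length_pySetD mem k _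
    have hb' : ∀ k' ∈ ks, 0 ≤ k' ∧ k' < (mem1.length : Int) := by
      intro k' hk'; rw [hlen1]; exact hb k' (by simp [hk'])
    obtain ⟨ihl, iht, ihv⟩ := ih mem1 (t - 1) hb'
    simp only [List.foldl_cons]
    refine ⟨by rw [ihl, hlen1], by rw [iht]; simp; omega, ?_⟩
    intro v hv
    rw [ihv v hv]
    have hget : PySem.List.pyGetD mem1 v 0
        = if v = k then PySem.List.pyGetD mem k 0 - 1 else PySem.List.pyGetD mem v 0 := by
      have hkn : k = ((k.toNat : Nat) : Int) := by omega
      have hvn : v = ((v.toNat : Nat) : Int) := by omega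
      rw [hmem1, hkn, hvn, PySem.List.pyGetD_pySetD_natCast mem k.toNat v.toNat _ 0 (by omega)]
      by_cases h : v.toNat = k.toNat <;> simp [h] <;> omega
    rw [hget, List.count_cons]
    by_cases h : v = k
    · simp [h]; ring
    · have : ¬ (k == v) = true := by simp [beq_iff_eq]; omega
      simp [h, this]

-- the value of A's second loop, as a double sum over the table contents
def pvAval (a b c d : Int) : Int :=
  pvS 1 (b + 1) (fun i => pvS 1 (min a i + 1) (fun w =>
    ((pvK i c d).length : Int) - ((pvK i c d).count (PySem.Int.bxor i w) : Int)))

def pvStepA (a d : Int) (st : (List Int × Int) × Int) (i : Int) : (List Int × Int) × Int :=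
  let cnt := (PySem.List.pyRange 1 (min a i + 1)).foldl
    (fun cnt j => cnt + (st.1.2 - PySem.List.pyGetD st.1.1 (PySem.Int.bxor i j) 0)) st.2
  let mt := (PySem.List.pyRange i (d + 1)).foldl
    (fun p k => (PySem.List.pySetD p.1 (PySem.Int.bxor i k)
      (PySem.List.pyGetD p.1 (PySem.Int.bxor i k) 0 - 1), p.2 - 1)) st.1
  (mt, cnt)

theorem pvAloop (a c d : Int) (hc4 : c ≤ 4095) (hd4 : d ≤ 4095) (b : Int) (hbc : b ≤ c) :
    ∀ (n : Nat) (x : Int), (b + 1 - x).toNat = n → 1 ≤ x →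
    ∀ (mem : List Int) (t cnt : Int), mem.length = 6000 →
      (∀ v : Int, 0 ≤ v → PySem.List.pyGetD mem v 0 = ((pvK x c d).count v : Int)) →
      t = ((pvK x c d).length : Int) →
      ((PySem.List.pyRange x (b + 1)).foldl (pvStepA a d) ((mem, t), cnt)).2
        = cnt + pvS x (b + 1) (fun i => pvS 1 (min a i + 1) (fun w =>
            ((pvK i c d).length : Int) - ((pvK i c d).count (PySem.Int.bxor i w) : Int))) := by
  intro n
  induction n with
  | zero =>
    intro x hx _ mem t cnt _ _ _
    rw [PySem.List.pyRange_one_eq_nil (by omega), pvS_nil (by omega)]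
    simp
  | succ n ih =>
    intro x hx hx1 mem t cnt hlen hinv ht
    have hxb : x < b + 1 := by omega
    rw [PySem.List.pyRange_one_cons hxb, List.foldl_cons]
    -- the state after processing i = x
    have hblockbound : ∀ k ∈ pvBlock x d, 0 ≤ k ∧ k < ((mem.length : Int)) := by
      intro k hk
      have := pvBlock_bound (y := x) (d := d) hx1 (by omega) hd4 k hk
      omega
    obtain ⟨hlen', ht', hinv'⟩ := pvDecr (pvBlock x d) mem t hblockbound
    have hmt : (PySem.List.pyRange x (d + 1)).foldl
        (fun p k => (PySem.List.pySetD p.1 (PySem.Int.bxor x k)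
          (PySem.List.pyGetD p.1 (PySem.Int.bxor x k) 0 - 1), p.2 - 1)) (mem, t)
        = (pvBlock x d).foldl (fun (st : List Int × Int) k =>
            (PySem.List.pySetD st.1 k (PySem.List.pyGetD st.1 k 0 - 1), st.2 - 1)) (mem, t) := by
      rw [pvBlock, List.foldl_map]
    have hcnt : (PySem.List.pyRange 1 (min a x + 1)).foldl
        (fun cnt j => cnt + (t - PySem.List.pyGetD mem (PySem.Int.bxor x j) 0)) cnt
        = cnt + pvS 1 (min a x + 1) (fun w =>
            ((pvK x c d).length : Int) - ((pvK x c d).count (PySem.Int.bxor x w) : Int)) := by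
      rw [PySem.List.foldl_add]
      congr 1
      show pvS 1 (min a x + 1) _ = _
      refine pvS_congr ?_
      intro w hw1 hw2
      rw [hinv (PySem.Int.bxor x w) ?_, ht]
      · rw [PySem.Int.bxor_of_nonneg (by omega) (by omega)]; positivity
    -- step state components
    have hKc : pvK x c d = pvBlock x d ++ pvK (x + 1) c d := pvK_cons (by omega)
    have hstep : pvStepA a d ((mem, t), cnt) x
        = (((pvBlock x d).foldl (fun (st : List Int × Int) k =>
            (PySem.List.pySetD st.1 k (PySem.List.pyGetD st.1 k 0 - 1), st.2 - 1)) (mem, t)),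
           cnt + pvS 1 (min a x + 1) (fun w =>
            ((pvK x c d).length : Int) - ((pvK x c d).count (PySem.Int.bxor x w) : Int))) := by
      show (_, _) = _
      rw [hmt, hcnt]
    rw [hstep, ih (x + 1) (by omega) (by omega) _ _ _ (by rw [hlen', hlen]) ?_ ?_]
    · rw [pvS_cons hxb]; ring
    · intro v hv
      rw [hinv' v hv, hinv v hv, hKc, List.count_append]
      push_cast; ring
    · rw [ht', ht, hKc, List.length_append]
      push_cast; ring

theorem pvA_eval (a b c d : Int) (hbc : b ≤ c) (hc4 : c ≤ 4095) (hd4 : d ≤ 4095) :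
    (let mem : List Int := List.replicate 6000 (0 : Int)
     let s1 : List Int × Int := (PySem.List.pyRange 1 (c + 1) 1).foldl
       (fun st i => (PySem.List.pyRange i (d + 1) 1).foldl
         (fun st j =>
           (PySem.List.pySetD st.1 (PySem.Int.bxor i j) (PySem.List.pyGetD st.1 (PySem.Int.bxor i j) 0 + 1),
            st.2 + 1)) st)
       (mem, 0)
     let s2 : (List Int × Int) × Int := (PySem.List.pyRange 1 (b + 1) 1).foldl
       (fun st i =>
         let cnt := (PySem.List.pyRange 1 (min a i + 1) 1).foldl
           (fun cnt j => cnt + (st.1.2 - PySem.List.pyGetD st.1.1 (PySem.Int.bxor i j) 0)) st.2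
         let mt := (PySem.List.pyRange i (d + 1) 1).foldl
           (fun p k => (PySem.List.pySetD p.1 (PySem.Int.bxor i k) (PySem.List.pyGetD p.1 (PySem.Int.bxor i k) 0 - 1), p.2 - 1)) st.1
         (mt, cnt))
       (s1, 0)
     s2.2) = pvAval a b c d := by
  show ((PySem.List.pyRange 1 (b + 1)).foldl (pvStepA a d) (_, 0)).2 = _
  have hflat : (PySem.List.pyRange 1 (c + 1)).foldl
      (fun st i => (PySem.List.pyRange i (d + 1)).foldl
        (fun st j =>
          (PySem.List.pySetD st.1 (PySem.Int.bxor i j) (PySem.List.pyGetD st.1 (PySem.Int.bxor i j) 0 + 1),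
           st.2 + 1)) st)
      (List.replicate 6000 (0 : Int), (0 : Int))
      = (pvK 1 c d).foldl (fun (st : List Int × Int) k =>
          (PySem.List.pySetD st.1 k (PySem.List.pyGetD st.1 k 0 + 1), st.2 + 1))
          (List.replicate 6000 (0 : Int), (0 : Int)) := by
    rw [pvK, List.foldl_flatMap]
    simp only [pvBlock, List.foldl_map]
  rw [hflat]
  have hbound : ∀ k ∈ pvK 1 c d, 0 ≤ k ∧ k < ((List.replicate 6000 (0 : Int)).length : Int) := by
    intro k hk
    have := pvK_bound (x := 1) (c := c) (d := d) le_rfl hc4 hd4 k hk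
    rw [List.length_replicate]; push_cast; omega
  obtain ⟨hlen, ht, hinv⟩ := pvIncr (pvK 1 c d) (List.replicate 6000 (0 : Int)) 0 hbound
  rw [pvAloop a c d hc4 hd4 b hbc (b + 1 - 1).toNat 1 rfl le_rfl _ _ _ (by rw [hlen, List.length_replicate]) ?_ ?_]
  · rw [pvAval]; ring
  · intro v hv
    rw [hinv v hv]
    have : PySem.List.pyGetD (List.replicate 6000 (0 : Int)) v 0 = 0 := by
      rw [PySem.List.pyGetD_of_nonneg _ _ hv]
      by_cases h : v.toNat < 6000
      · rw [List.getD_replicate _ h]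
      · rw [List.getD_eq_default _ _ (by rw [List.length_replicate]; omega)]
    rw [this]; ring
  · rw [ht]; ring

def pvStepB (a b d : Int) (st : PySem.Dict Int Int × Int) (y : Int) : PySem.Dict Int Int × Int :=
  let fr := if y ≤ b then
      (PySem.List.pyRange 1 (min a y + 1)).foldl
        (fun fr w =>
          let v := PySem.Int.bxor w y
          fr.insert v (fr.getD v 0 + 1)) st.1
    else st.1
  let bd := (PySem.List.pyRange y (d + 1)).foldl
    (fun bd z => bd + fr.getD (PySem.Int.bxor y z) 0) st.2
  (fr, bd)

theorem pvH_succ_le {a b y : Int} (h1 : 1 ≤ y) (hyb : y ≤ b) :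
    pvH a b y = pvH a b (y - 1)
      ++ (PySem.List.pyRange 1 (min a y + 1)).map (fun w => PySem.Int.bxor w y) := by
  unfold pvH
  have h2 : min b y = y := by omega
  have h3 : min b (y - 1) = y - 1 := by omega
  rw [h2, h3]
  have h4 : PySem.List.pyRange 1 (y - 1 + 1) ++ [y] = PySem.List.pyRange 1 (y + 1) := by
    have := PySem.List.pyRange_one_succ_right (a := 1) (b := y) h1
    simpa using this.symm
  rw [← h4, List.flatMap_append]
  simp

theorem pvH_succ_gt {a b y : Int} (hyb : b < y) : pvH a b y = pvH a b (y - 1) := by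
  unfold pvH
  have h2 : min b y = b := by omega
  have h3 : min b (y - 1) = b := by omega
  rw [h2, h3]

theorem pvBloop (a b c d : Int) :
    ∀ (n : Nat) (y : Int), (c + 1 - y).toNat = n → 1 ≤ y →
    ∀ (fr : PySem.Dict Int Int) (bd : Int),
      (∀ v : Int, fr.getD v 0 = ((pvH a b (y - 1)).count v : Int)) →
      ((PySem.List.pyRange y (c + 1)).foldl (pvStepB a b d) (fr, bd)).2
        = bd + pvS y (c + 1) (fun y' => pvS y' (d + 1) (fun z =>
            ((pvH a b y').count (PySem.Int.bxor y' z) : Int))) := by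
  intro n
  induction n with
  | zero =>
    intro y hy _ fr bd _
    rw [PySem.List.pyRange_one_eq_nil (by omega), pvS_nil (by omega)]
    simp
  | succ n ih =>
    intro y hy hy1 fr bd hinv
    have hyc : y < c + 1 := by omega
    rw [PySem.List.pyRange_one_cons hyc, List.foldl_cons]
    have hinv' : ∀ v : Int, (pvStepB a b d (fr, bd) y).1.getD v 0
        = ((pvH a b y).count v : Int) := by
      intro v
      show (if y ≤ b then _ else fr).getD v 0 = _
      by_cases hyb : y ≤ b
      · rw [if_pos hyb]
        have hmap : (PySem.List.pyRange 1 (min a y + 1)).foldl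
            (fun fr w =>
              let v := PySem.Int.bxor w y
              fr.insert v (fr.getD v 0 + 1)) fr
            = ((PySem.List.pyRange 1 (min a y + 1)).map (fun w => PySem.Int.bxor w y)).foldl
                (fun (fr : PySem.Dict Int Int) v => fr.insert v (fr.getD v 0 + 1)) fr := by
          rw [List.foldl_map]
        rw [hmap, PySem.Dict.getD_foldl_insert_add_one, hinv v,
          pvH_succ_le hy1 hyb, List.count_append]
        push_cast; ring
      · rw [if_neg hyb, hinv v, show pvH a b y = pvH a b (y - 1) from pvH_succ_gt (by omega)]
    have hbd : (pvStepB a b d (fr, bd) y).2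
        = bd + pvS y (d + 1) (fun z => ((pvH a b y).count (PySem.Int.bxor y z) : Int)) := by
      show (PySem.List.pyRange y (d + 1)).foldl _ bd = _
      rw [PySem.List.foldl_add]
      congr 1
      show pvS y (d + 1) _ = _
      exact pvS_congr (fun z _ _ => hinv' (PySem.Int.bxor y z))
    have hst : pvStepB a b d (fr, bd) y = ((pvStepB a b d (fr, bd) y).1, (pvStepB a b d (fr, bd) y).2) := rfl
    rw [hst, hbd, ih (y + 1) (by omega) (by omega) _ _ (by simpa using hinv')]
    rw [pvS_cons hyc]
    ring

def pvBgood (a b c d : Int) : Int :=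
  pvS 1 (b + 1) (fun x => if 0 < min a x then
    min a x * PySem.Int.floordiv ((c - x + 1) * (2 * (d - c) + (c - x + 1) + 1)) 2 else 0)

def pvBbad (a b c d : Int) : Int :=
  pvS 1 (c + 1) (fun y => pvS y (d + 1) (fun z =>
    ((pvH a b y).count (PySem.Int.bxor y z) : Int)))

theorem pvH_zero (a b : Int) : pvH a b 0 = [] := by
  unfold pvH
  rw [PySem.List.pyRange_one_eq_nil (by omega)]
  rfl

theorem pvB_eval (a b c d : Int) :
    (let total : Int := (PySem.List.pyRange 1 (b + 1) 1).foldl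
       (fun tot x =>
         let nw := min a x
         if nw > 0 then
           let k := c - x + 1
           tot + nw * PySem.Int.floordiv (k * (2 * (d - c) + k + 1)) 2
         else tot) 0
     let s : PySem.Dict Int Int × Int := (PySem.List.pyRange 1 (c + 1) 1).foldl
       (fun st y =>
         let fr := if y ≤ b then
             (PySem.List.pyRange 1 (min a y + 1) 1).foldl
               (fun fr w =>
                 let v := PySem.Int.bxor w y
                 fr.insert v (fr.getD v 0 + 1)) st.1
           else st.1
         let bd := (PySem.List.pyRange y (d + 1) 1).foldl
           (fun bd z => bd + fr.getD (PySem.Int.bxor y z) 0) st.2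
         (fr, bd))
       (PySem.Dict.empty, 0)
     total - s.2) = pvBgood a b c d - pvBbad a b c d := by
  show ((PySem.List.pyRange 1 (b + 1)).foldl _ 0) - ((PySem.List.pyRange 1 (c + 1)).foldl (pvStepB a b d) (PySem.Dict.empty, 0)).2 = _
  congr 1
  · -- total = pvBgood
    rw [PySem.List.foldl_congr_mem (PySem.List.pyRange 1 (b + 1)) _
        (fun tot x => tot + (if 0 < min a x then
          min a x * PySem.Int.floordiv ((c - x + 1) * (2 * (d - c) + (c - x + 1) + 1)) 2 else 0)) 0 ?_]
    · rw [PySem.List.foldl_add]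
      rw [pvBgood]
      show 0 + pvS 1 (b+1) _ = _
      ring
    · intro acc x _
      show (if 0 < min a x then _ else acc) = acc + _
      by_cases h : 0 < min a x
      · rw [if_pos h, if_pos h]
      · rw [if_neg h, if_neg h]; ring
  · -- s.2 = pvBbad
    rw [pvBloop a b c d (c + 1 - 1).toNat 1 rfl le_rfl PySem.Dict.empty 0 ?_]
    · rw [pvBbad]; ring
    · intro v
      rw [PySem.Dict.getD_empty]
      norm_num
      rw [List.count_eq_zero.mpr (by rw [pvH_zero]; exact List.not_mem_nil)]
      norm_num

def pvI (y z x w : Int) : Int :=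
  if PySem.Int.bxor y z = PySem.Int.bxor x w then 1 else 0

theorem pvCountK (x c d v : Int) :
    (((pvK x c d).count v : Int))
      = pvS x (c + 1) (fun y => pvS y (d + 1) (fun z =>
          if PySem.Int.bxor y z = v then 1 else 0)) := by
  rw [pvK, List.count_flatMap, Nat.cast_list_sum, List.map_map]
  show pvS x (c + 1) _ = _
  refine pvS_congr ?_
  intro y _ _
  show ((List.count v (pvBlock y d) : Nat) : Int) = _
  rw [pvBlock, List.count_eq_countP, List.countP_map,
    ← PySem.List.sum_map_ite_one_zero ((· == v) ∘ fun z => PySem.Int.bxor y z)]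
  show pvS y (d + 1) _ = pvS y (d + 1) _
  refine pvS_congr ?_
  intro z _ _
  simp [beq_iff_eq]

theorem pvCountH (a b m u : Int) :
    (((pvH a b m).count u : Int))
      = pvS 1 (min b m + 1) (fun x => pvS 1 (min a x + 1) (fun w =>
          if PySem.Int.bxor w x = u then 1 else 0)) := by
  rw [pvH, List.count_flatMap, Nat.cast_list_sum, List.map_map]
  show pvS 1 (min b m + 1) _ = _
  refine pvS_congr ?_
  intro x _ _
  show ((List.count u _ : Nat) : Int) = _
  rw [List.count_eq_countP, List.countP_map,
    ← PySem.List.sum_map_ite_one_zero ((· == u) ∘ fun w => PySem.Int.bxor w x)]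
  show pvS 1 (min a x + 1) _ = pvS 1 (min a x + 1) _
  refine pvS_congr ?_
  intro w _ _
  simp [beq_iff_eq]

theorem pvLenK {x c d : Int} (hcd : c ≤ d) :
    (((pvK x c d).length : Int)) = pvS x (c + 1) (fun y => d - y + 1) := by
  rw [pvK, List.length_flatMap, Nat.cast_list_sum, List.map_map]
  show pvS x (c + 1) _ = _
  refine pvS_congr ?_
  intro y _ hy
  show (((pvBlock y d).length : Nat) : Int) = _
  rw [pvBlock, List.length_map, PySem.List.length_pyRange_one]
  omega

theorem pvGauss (c d : Int) :
    ∀ (n : Nat) (x : Int), x = c + 1 - n →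
      2 * pvS x (c + 1) (fun y => d - y + 1)
        = (c - x + 1) * (2 * (d - c) + (c - x + 1) + 1) := by
  intro n
  induction n with
  | zero =>
    intro x hx
    rw [pvS_nil (by omega)]
    have : c - x + 1 = 0 := by omega
    rw [this]; ring
  | succ n ih =>
    intro x hx
    rw [pvS_cons (by omega)]
    have := ih (x + 1) (by omega)
    linear_combination this

theorem pvTri (b c : Int) (hbc : b ≤ c) (G : Int → Int → Int) :
    pvS 1 (b + 1) (fun x => pvS x (c + 1) (fun y => G x y))
      = pvS 1 (c + 1) (fun y => pvS 1 (min b y + 1) (fun x => G x y)) := by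
  by_cases hb : b < 1
  · rw [pvS_nil (by omega)]
    calc (0:Int) = pvS 1 (c+1) (fun _ => 0) := (pvS_zero _ _).symm
      _ = _ := pvS_congr (fun y hy1 _ => by
          rw [pvS_nil (show min b y + 1 ≤ 1 by omega)])
  · have lhs : pvS 1 (b + 1) (fun x => pvS x (c + 1) (fun y => G x y))
        = pvS 1 (b + 1) (fun x => pvS 1 (c + 1) (fun y => if x ≤ y then G x y else 0)) := by
      refine pvS_congr ?_
      intro x hx1 hx2
      rw [pvS_append (show (1:Int) ≤ x from hx1) (show x ≤ c + 1 by omega)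
        (fun y => if x ≤ y then G x y else 0)]
      have h0 : pvS 1 x (fun y => if x ≤ y then G x y else 0) = 0 := by
        calc pvS 1 x (fun y => if x ≤ y then G x y else 0)
            = pvS 1 x (fun _ => 0) := pvS_congr (fun y _ hy => by rw [if_neg (by omega)])
          _ = 0 := pvS_zero _ _
      rw [h0]
      have h1 : pvS x (c + 1) (fun y => if x ≤ y then G x y else 0)
          = pvS x (c + 1) (fun y => G x y) :=
        pvS_congr (fun y hy _ => by rw [if_pos hy])
      rw [h1]; ring
    rw [lhs, pvS_comm]
    refine pvS_congr ?_
    intro y hy1 hy2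
    have hmin1 : (1:Int) ≤ min b y + 1 := by omega
    rw [pvS_append hmin1 (show min b y + 1 ≤ b + 1 by omega)
      (fun x => if x ≤ y then G x y else 0)]
    have h1 : pvS 1 (min b y + 1) (fun x => if x ≤ y then G x y else 0)
        = pvS 1 (min b y + 1) (fun x => G x y) :=
      pvS_congr (fun x _ hx => by rw [if_pos (by omega)])
    have h0 : pvS (min b y + 1) (b + 1) (fun x => if x ≤ y then G x y else 0) = 0 := by
      calc pvS (min b y + 1) (b + 1) (fun x => if x ≤ y then G x y else 0)
          = pvS (min b y + 1) (b + 1) (fun _ => 0) :=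
            pvS_congr (fun x hx _ => by rw [if_neg (by omega)])
        _ = 0 := pvS_zero _ _
    rw [h1, h0]; ring

-- the core identity: A's accumulated count equals B's total-minus-bad
theorem pvCore (a b c d : Int) (hbc : b ≤ c) (hcd : c ≤ d) :
    pvAval a b c d = pvBgood a b c d - pvBbad a b c d := by
  -- split A into good and bad parts
  have hA : pvAval a b c d
      = pvS 1 (b + 1) (fun x => pvS 1 (min a x + 1) (fun _ => ((pvK x c d).length : Int)))
        - pvS 1 (b + 1) (fun x => pvS 1 (min a x + 1) (fun w =>
            ((pvK x c d).count (PySem.Int.bxor x w) : Int))) := by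
    rw [pvAval, ← pvS_sub]
    exact pvS_congr (fun x _ _ => by rw [← pvS_sub])
  rw [hA]
  congr 1
  · -- good parts agree
    rw [pvBgood]
    refine pvS_congr ?_
    intro x hx1 hx2
    rw [pvS_const]
    by_cases h : 0 < min a x
    · rw [if_pos h, pvLenK hcd]
      have hg := pvGauss c d (c + 1 - x).toNat x (by omega)
      have hfd : PySem.Int.floordiv ((c - x + 1) * (2 * (d - c) + (c - x + 1) + 1)) 2
          = pvS x (c + 1) (fun y => d - y + 1) := by
        rw [← hg, PySem.Int.floordiv_eq_ediv_of_pos (by norm_num),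
          Int.mul_ediv_cancel_left _ (by norm_num)]
      rw [hfd]
      congr 1
      omega
    · rw [if_neg h]
      have : (min a x + 1 - 1).toNat = 0 := by omega
      rw [this]; ring
  · -- bad parts agree
    have hAbad : pvS 1 (b + 1) (fun x => pvS 1 (min a x + 1) (fun w =>
          ((pvK x c d).count (PySem.Int.bxor x w) : Int)))
        = pvS 1 (b + 1) (fun x => pvS x (c + 1) (fun y => pvS 1 (min a x + 1) (fun w =>
            pvS y (d + 1) (fun z => pvI y z x w)))) := by
      refine pvS_congr ?_
      intro x _ _
      rw [show pvS 1 (min a x + 1) (fun w => ((pvK x c d).count (PySem.Int.bxor x w) : Int))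
          = pvS 1 (min a x + 1) (fun w => pvS x (c + 1) (fun y => pvS y (d + 1) (fun z =>
              pvI y z x w))) from pvS_congr (fun w _ _ => by rw [pvCountK]; rfl)]
      exact pvS_comm _ _ _ _ _
    have hBbad : pvBbad a b c d
        = pvS 1 (c + 1) (fun y => pvS 1 (min b y + 1) (fun x => pvS 1 (min a x + 1) (fun w =>
            pvS y (d + 1) (fun z => pvI y z x w)))) := by
      rw [pvBbad]
      refine pvS_congr ?_
      intro y _ _
      rw [show pvS y (d + 1) (fun z => ((pvH a b y).count (PySem.Int.bxor y z) : Int))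
          = pvS y (d + 1) (fun z => pvS 1 (min b y + 1) (fun x => pvS 1 (min a x + 1) (fun w =>
              pvI y z x w))) from pvS_congr (fun z _ _ => by
                rw [pvCountH]
                refine pvS_congr (fun x _ _ => pvS_congr (fun w _ _ => ?_))
                rw [pvI, PySem.Int.bxor_comm w x]
                exact if_congr eq_comm rfl rfl)]
      rw [pvS_comm]
      refine pvS_congr ?_
      intro x _ _
      exact pvS_comm _ _ _ _ _
    rw [hAbad, hBbad]
    exact pvTri b c hbc _

theorem pvA_eval0 (a b c d : Int) (hb : b ≤ 0) (hc : c ≤ 0) :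
    (let mem : List Int := List.replicate 6000 (0 : Int)
     let s1 : List Int × Int := (PySem.List.pyRange 1 (c + 1) 1).foldl
       (fun st i => (PySem.List.pyRange i (d + 1) 1).foldl
         (fun st j =>
           (PySem.List.pySetD st.1 (PySem.Int.bxor i j) (PySem.List.pyGetD st.1 (PySem.Int.bxor i j) 0 + 1),
            st.2 + 1)) st)
       (mem, 0)
     let s2 : (List Int × Int) × Int := (PySem.List.pyRange 1 (b + 1) 1).foldl
       (fun st i =>
         let cnt := (PySem.List.pyRange 1 (min a i + 1) 1).foldl
           (fun cnt j => cnt + (st.1.2 - PySem.List.pyGetD st.1.1 (PySem.Int.bxor i j) 0)) st.2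
         let mt := (PySem.List.pyRange i (d + 1) 1).foldl
           (fun p k => (PySem.List.pySetD p.1 (PySem.Int.bxor i k) (PySem.List.pyGetD p.1 (PySem.Int.bxor i k) 0 - 1), p.2 - 1)) st.1
         (mt, cnt))
       (s1, 0)
     s2.2) = 0 := by
  rw [PySem.List.pyRange_one_eq_nil (show c + 1 ≤ 1 by omega),
    PySem.List.pyRange_one_eq_nil (show b + 1 ≤ 1 by omega)]
  rfl

theorem pvB_eval0 (a b c d : Int) (hb : b ≤ 0) (hc : c ≤ 0) :
    (let total : Int := (PySem.List.pyRange 1 (b + 1) 1).foldl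
       (fun tot x =>
         let nw := min a x
         if nw > 0 then
           let k := c - x + 1
           tot + nw * PySem.Int.floordiv (k * (2 * (d - c) + k + 1)) 2
         else tot) 0
     let s : PySem.Dict Int Int × Int := (PySem.List.pyRange 1 (c + 1) 1).foldl
       (fun st y =>
         let fr := if y ≤ b then
             (PySem.List.pyRange 1 (min a y + 1) 1).foldl
               (fun fr w =>
                 let v := PySem.Int.bxor w y
                 fr.insert v (fr.getD v 0 + 1)) st.1
           else st.1
         let bd := (PySem.List.pyRange y (d + 1) 1).foldl
           (fun bd z => bd + fr.getD (PySem.Int.bxor y z) 0) st.2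
         (fr, bd))
       (PySem.Dict.empty, 0)
     total - s.2) = 0 := by
  rw [PySem.List.pyRange_one_eq_nil (show c + 1 ≤ 1 by omega),
    PySem.List.pyRange_one_eq_nil (show b + 1 ≤ 1 by omega)]
  rfl

theorem pvLen4 (l : List Int) (h : l.length = 4) : ∃ p q r t : Int, l = [p, q, r, t] := by
  match l, h with
  | [p, q, r, t], _ => exact ⟨p, q, r, t, rfl⟩

-- ===== VERDICT (by name: the statement is the Claim_ definition above) =====
theorem beautifulQuadruples_spec : Claim_equal_beautifulQuadruples := by
  intro a b c d _ hpre
  unfold Spec_beautifulQuadruples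
  obtain ⟨a', b', c', d', hs⟩ := pvLen4 (PySem.List.sorted [a, b, c, d] (fun x => x) false)
    (by rw [(PySem.List.sorted_perm [a, b, c, d] (fun x => x) false).length_eq]; rfl)
  have hperm : [a', b', c', d'].Perm [a, b, c, d] := by
    rw [← hs]; exact PySem.List.sorted_perm _ _ _
  have hpair := PySem.List.sorted_pairwise [a, b, c, d] (fun x => x)
  rw [hs] at hpair
  simp only [List.pairwise_cons, List.mem_cons, List.not_mem_nil] at hpair
  have hab' : a' ≤ b' := by
    have := hpair.1 b' (by tauto); omega
  have hbc' : b' ≤ c' := by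
    have := hpair.2.1 c' (by tauto); omega
  have hcd' : c' ≤ d' := by
    have := hpair.2.2.1 d' (by tauto); omega
  unfold beautifulQuadruples beautifulQuadruples_alt
  rw [hs]
  rcases hpre with hp | hp
  · -- at most one argument positive: every loop is empty, both sides are 0
    have hcnt : List.countP (fun t : Int => decide (0 < t)) [a, b, c, d] ≤ 1 := by
      simp only [List.countP_cons, List.countP_nil, decide_eq_true_eq]
      split_ifs at hp ⊢ <;> omega
    have hcnt' := hperm.countP_eq (fun t : Int => decide (0 < t))
    have hc0 : c' ≤ 0 := by
      by_contra hpos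
      have h2 : 2 ≤ List.countP (fun t : Int => decide (0 < t)) [a', b', c', d'] := by
        simp only [List.countP_cons, List.countP_nil, decide_eq_true_eq]
        split_ifs <;> omega
      omega
    exact (pvA_eval0 a' b' c' d' (by omega) (by omega)).trans
      (pvB_eval0 a' b' c' d' (by omega) (by omega)).symm
  · -- all arguments ≤ 4095: the table-based and the dict-based computation agree
    have hmemc : c' ∈ [a, b, c, d] := hperm.mem_iff.mp (by simp)
    have hmemd : d' ∈ [a, b, c, d] := hperm.mem_iff.mp (by simp)
    simp only [List.mem_cons, List.not_mem_nil, or_false] at hmemc hmemd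
    have hc4 : c' ≤ 4095 := by rcases hmemc with h | h | h | h <;> omega
    have hd4 : d' ≤ 4095 := by rcases hmemd with h | h | h | h <;> omega
    exact (pvA_eval a' b' c' d' hbc' hc4 hd4).trans
      ((pvCore a' b' c' d' hbc' hcd').trans (pvB_eval a' b' c' d').symm)
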